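-- pv_equiv track=rewrite | github.com/sabhay23extc-lang/Text-Compresseion | TextCompression.py | decode_text
-- ===== SOURCE A (Python) =====
-- def decode_text(encoded, codes):
--     reverse = {v: k for k, v in codes.items()}
--     current = ""
--     decoded = ""
--     for bit in encoded:
--         current += bit
--         if current in reverse:
--             decoded += reverse[current]
--             current = ""
--     return decoded
-- ===== SOURCE B (Python) =====
-- def decode_text(encoded, codes):
--     # Build a trie (nested dicts) over the code bitstrings; the decoded
--     # character sits at the terminal node under the key None.
--     root = {}
--     for ch, code in codes.items():
--         node = root
--         for bit in code:
--             node = node.setdefault(bit, {})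
--         node[None] = ch
--     decoded = ""
--     node = root
--     for bit in encoded:
--         if node is None:
--             continue  # fell off the trie earlier: no code can ever match again
--         node = node.get(bit)
--         if node is None:
--             continue
--         ch = node.get(None)
--         if ch is not None:
--             decoded += ch
--             node = root
--     return decoded
-- ===== Notes on version B (the rewrite author's own statement) =====
-- stated objective: idiomatic
-- what changed: Replaces the growing-prefix string plus reverse-dict membership test with a trie built once from the codes: decoding walks one node pointer per bit, emits at a value-carrying node and resets, and moves to a dead state when it falls off the trie.
import Mathlib
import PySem

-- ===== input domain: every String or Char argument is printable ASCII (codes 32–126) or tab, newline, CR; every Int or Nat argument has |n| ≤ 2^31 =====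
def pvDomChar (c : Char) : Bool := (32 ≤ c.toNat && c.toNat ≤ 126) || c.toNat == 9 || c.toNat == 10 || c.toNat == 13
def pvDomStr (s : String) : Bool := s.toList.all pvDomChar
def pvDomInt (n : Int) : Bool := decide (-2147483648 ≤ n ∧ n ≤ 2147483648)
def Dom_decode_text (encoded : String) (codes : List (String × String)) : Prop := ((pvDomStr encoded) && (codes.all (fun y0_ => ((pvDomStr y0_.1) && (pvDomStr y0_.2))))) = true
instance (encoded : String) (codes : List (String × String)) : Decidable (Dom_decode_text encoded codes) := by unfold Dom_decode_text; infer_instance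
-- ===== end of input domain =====

-- B replaces the growing-prefix reverse-dict membership test with a trie walked one node per bit (idiomatic decoder); same return value everywhere.

-- ===== PORT A =====
-- A's loop over `encoded`, carrying (current, decoded); `current` is kept as a
-- List Char (Python string concatenation char by char), turned into a String at
-- the dict lookup.
def decodeLoopA (reverse : PySem.Dict String String) (bits : List Char)
    (st : List Char × String) : List Char × String :=
  match bits with
  | [] => st
  | b :: rest =>
      let current := st.1 ++ [b]
      match reverse.get? (String.ofList current) with
      | some k => decodeLoopA reverse rest ([], st.2 ++ k)
      | none => decodeLoopA reverse rest (current, st.2)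

def decode_text (encoded : String) (codes : List (String × String)) : String :=
  let reverse : PySem.Dict String String :=
    codes.foldl (fun d kv => d.insert kv.2 kv.1) PySem.Dict.empty
  (decodeLoopA reverse encoded.toList ([], "")).2

-- ===== PORT B =====
mutual
inductive PTrie where
  | node : Option String → PChildren → PTrie
inductive PChildren where
  | nil : PChildren
  | cons : Char → PTrie → PChildren → PChildren
end

def PTrie.val : PTrie → Option String
  | .node v _ => v

def PTrie.kids : PTrie → PChildren
  | .node _ cs => cs

def childGet : PChildren → Char → Option PTrie
  | .nil, _ => none
  | .cons c t rest, b => if c = b then some t else childGet rest b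

def childSet : PChildren → Char → PTrie → PChildren
  | .nil, b, t => .cons b t .nil
  | .cons c t0 rest, b, t =>
      if c = b then .cons c t rest else .cons c t0 (childSet rest b t)

def trieInsert : PTrie → List Char → String → PTrie
  | .node _ cs, [], k => .node (some k) cs
  | .node v cs, b :: rest, k =>
      .node v (childSet cs b
        (trieInsert ((childGet cs b).getD (.node none .nil)) rest k))

def trieBuild (codes : List (String × String)) : PTrie :=
  codes.foldl (fun t kv => trieInsert t kv.2.toList kv.1) (.node none .nil)

-- B's decode loop: node pointer (none = dead state), output accumulator.
def decodeLoopB (root : PTrie) (bits : List Char)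
    (st : Option PTrie × String) : Option PTrie × String :=
  match bits with
  | [] => st
  | b :: rest =>
      match st.1 with
      | none => decodeLoopB root rest st
      | some n =>
          match childGet n.kids b with
          | none => decodeLoopB root rest (none, st.2)
          | some n' =>
              match n'.val with
              | some c => decodeLoopB root rest (some root, st.2 ++ c)
              | none => decodeLoopB root rest (some n', st.2)

def decode_text_alt (encoded : String) (codes : List (String × String)) : String :=
  let root := trieBuild codes
  (decodeLoopB root encoded.toList (some root, "")).2

-- ===== PRECONDITION & SPEC =====
def Spec_decode_text (encoded : String) (codes : List (String × String)) (out : String) : Prop := out = decode_text_alt encoded codes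
instance (encoded : String) (codes : List (String × String)) (out : String) : Decidable (Spec_decode_text encoded codes out) := by unfold Spec_decode_text; infer_instance

-- ===== CLAIM (what is proved, stated in full; the proofs are below) =====
def Claim_equal_decode_text : Prop := ∀ (encoded : String) (codes : List (String × String)), Dom_decode_text encoded codes → Spec_decode_text encoded codes (decode_text encoded codes)

-- ===== LEMMAS AND PROOFS =====

-- Descend the trie along a char list (none = fell off).
def descend : PTrie → List Char → Option PTrie
  | t, [] => some t
  | t, b :: rest =>
      match childGet t.kids b with
      | none => none
      | some t' => descend t' rest

-- Value found at the end of a full descent.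
def trieFind (t : PTrie) (s : List Char) : Option String :=
  (descend t s).bind PTrie.val

theorem childGet_childSet_self : ∀ (cs : PChildren) (c : Char) (t : PTrie),
    childGet (childSet cs c t) c = some t
  | .nil, c, t => by simp [childSet, childGet]
  | .cons c0 t0 rest, c, t => by
      by_cases h : c0 = c <;>
        simp [childSet, childGet, h, childGet_childSet_self rest c t]

theorem childGet_childSet_ne : ∀ (cs : PChildren) (c b : Char) (t : PTrie),
    b ≠ c → childGet (childSet cs c t) b = childGet cs b
  | .nil, c, b, t, h => by simp [childSet, childGet, Ne.symm h]
  | .cons c0 t0 rest, c, b, t, h => by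
      by_cases h0 : c0 = c
      · subst h0; simp [childSet, childGet, Ne.symm h]
      · by_cases h1 : c0 = b <;>
          simp [childSet, childGet, h0, h1, h,
            childGet_childSet_ne rest c b t h]

theorem trieFind_empty (s : List Char) :
    trieFind (.node none .nil) s = none := by
  cases s <;> simp [trieFind, descend, childGet, PTrie.kids, PTrie.val]

theorem trieFind_insert (key : List Char) (k : String) (t : PTrie) (s : List Char) :
    trieFind (trieInsert t key k) s = if s = key then some k else trieFind t s := by
  induction key generalizing t s with
  | nil =>
      cases t with
      | node v cs =>
          cases s with
          | nil => simp [trieInsert, trieFind, descend, PTrie.val]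
          | cons b rest =>
              simp only [trieInsert, trieFind, descend, PTrie.kids, PTrie.val]
              simp
  | cons c kr ih =>
      cases t with
      | node v cs =>
          cases s with
          | nil => simp [trieInsert, trieFind, descend, PTrie.val]
          | cons b rest =>
              simp only [trieInsert, trieFind, descend, PTrie.kids]
              by_cases hb : b = c
              · subst hb
                rw [childGet_childSet_self]
                have := ih ((childGet cs b).getD (.node none .nil)) rest
                simp only [trieFind] at this
                rw [this]
                by_cases hr : rest = kr
                · simp [hr]
                · simp only [hr, if_false]
                  have hne : (b :: rest) ≠ (b :: kr) := by simp [hr]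
                  simp only [hne, if_false]
                  cases hcg : childGet cs b with
                  | none =>
                      simp only [Option.getD]
                      have h0 := trieFind_empty rest
                      simp only [trieFind] at h0
                      cases hd : descend (.node none .nil) rest with
                      | none => simp
                      | some u => simp only [hd, Option.bind_some] at h0; simp [h0]
                  | some t' => simp [Option.getD]
              · rw [childGet_childSet_ne _ _ _ _ hb]
                have hne : (b :: rest) ≠ (c :: kr) := by simp [hb]
                simp [hne]

theorem trieFind_build (codes : List (String × String)) (s : List Char) :
    trieFind (trieBuild codes) s =
      (codes.foldl (fun d kv => d.insert kv.2 kv.1) PySem.Dict.empty).get? (String.ofList s) := by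
  suffices h : ∀ (t : PTrie) (d : PySem.Dict String String),
      (∀ u : List Char, trieFind t u = d.get? (String.ofList u)) →
      ∀ u, trieFind (codes.foldl (fun t kv => trieInsert t kv.2.toList kv.1) t)
        u = (codes.foldl (fun d kv => d.insert kv.2 kv.1) d).get? (String.ofList u) by
    exact h _ _ (fun u => by simp [trieFind_empty]) s
  induction codes with
  | nil => intro t d h u; simpa using h u
  | cons kv rest ih =>
      intro t d h u
      simp only [List.foldl_cons]
      refine ih _ _ (fun w => ?_) u
      rw [trieFind_insert, PySem.Dict.get?_insert]
      have hmk : (String.ofList w = kv.2) ↔ (w = kv.2.toList) := by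
        constructor
        · intro e
          have := congrArg String.toList e
          simpa using this
        · intro e; rw [e, String.ofList_toList]
      by_cases hw : w = kv.2.toList
      · rw [if_pos hw, if_pos (hmk.mpr hw)]
      · rw [if_neg hw, if_neg (fun e => hw (hmk.mp e))]
        exact h w

-- descend along an appended char.
theorem descend_snoc (t : PTrie) (s : List Char) (b : Char) :
    descend t (s ++ [b]) =
      (descend t s).bind (fun n => childGet n.kids b) := by
  induction s generalizing t with
  | nil => cases h : childGet t.kids b <;> simp [descend, h]
  | cons c rest ih =>
      simp only [List.cons_append, descend]
      cases childGet t.kids c with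
      | none => simp
      | some t' => simpa using ih t'

-- Main loop invariant: A's state (cur, dec) corresponds to B's state (st, dec)
-- with st = descend root cur, provided no nonempty prefix of cur is a code.
theorem loop_eq (codes : List (String × String)) (bits : List Char) :
    ∀ (cur : List Char) (dec : String) (st : Option PTrie),
      st = descend (trieBuild codes) cur →
      (∀ p, p ≠ [] → p <+: cur → trieFind (trieBuild codes) p = none) →
      (decodeLoopA (codes.foldl (fun d kv => d.insert kv.2 kv.1) PySem.Dict.empty)
        bits (cur, dec)).2 =
      (decodeLoopB (trieBuild codes) bits (st, dec)).2 := by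
  induction bits with
  | nil => intro cur dec st hst hpre; simp [decodeLoopA, decodeLoopB]
  | cons b rest ih =>
      intro cur dec st hst hpre
      subst hst
      have hfind := trieFind_build codes
      have hdesc := descend_snoc (trieBuild codes) cur b
      simp only [decodeLoopA, decodeLoopB]
      rw [← hfind (cur ++ [b])]
      cases hd : descend (trieBuild codes) cur with
      | none =>
          have hdnone : descend (trieBuild codes) (cur ++ [b]) = none := by
            rw [hdesc, hd]; rfl
          have hfnone : trieFind (trieBuild codes) (cur ++ [b]) = none := by
            simp [trieFind, hdnone]
          rw [hfnone]
          simpa using ih (cur ++ [b]) dec none (by rw [hdnone]) (fun p hp hpr => by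
            rcases List.prefix_concat_iff.mp hpr with h1 | h1
            · rw [h1]; exact hfnone
            · exact hpre p hp h1)
      | some n =>
          cases hcg : childGet n.kids b with
          | none =>
              have hdnone : descend (trieBuild codes) (cur ++ [b]) = none := by
                rw [hdesc, hd]; simpa using hcg
              have hfnone : trieFind (trieBuild codes) (cur ++ [b]) = none := by
                simp [trieFind, hdnone]
              rw [hfnone]
              simpa [hcg] using ih (cur ++ [b]) dec none (by rw [hdnone]) (fun p hp hpr => by
                rcases List.prefix_concat_iff.mp hpr with h1 | h1
                · rw [h1]; exact hfnone
                · exact hpre p hp h1)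
          | some n' =>
              have hdsome : descend (trieBuild codes) (cur ++ [b]) = some n' := by
                rw [hdesc, hd]; simpa using hcg
              have hfv : trieFind (trieBuild codes) (cur ++ [b]) = n'.val := by
                simp [trieFind, hdsome]
              rw [hfv]
              cases hv : n'.val with
              | some c =>
                  simpa [hcg, hv] using ih [] (dec ++ c) (some (trieBuild codes)) rfl
                    (fun p hp hpr => absurd (List.prefix_nil.mp hpr) hp)
              | none =>
                  simpa [hcg, hv] using ih (cur ++ [b]) dec (some n') (by rw [hdsome]) (fun p hp hpr => by
                    rcases List.prefix_concat_iff.mp hpr with h1 | h1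
                    · rw [h1, hfv, hv]
                    · exact hpre p hp h1)

-- ===== VERDICT (by name: the statement is the Claim_ definition above) =====
theorem decode_text_spec : Claim_equal_decode_text := by
  intro encoded codes _
  unfold Spec_decode_text decode_text decode_text_alt
  exact loop_eq codes encoded.toList [] "" (some (trieBuild codes)) rfl
    (fun p hp hpr => absurd (List.prefix_nil.mp hpr) hp)
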